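-- pv_equiv track=rewrite | github.com/Pragmatismo/Pigrow | scripts/gui/info_modules/info_camera.py | summarize_cameras
-- ===== SOURCE A (Python) =====
-- def summarize_cameras(cameras):
--     count = len(cameras)
--     if count == 0:
--         return "Detected 0 cameras."
--     # Group cameras by interface type
--     grouped = {}
--     for iface, name in cameras:
--         grouped.setdefault(iface, []).append(name)
--     type_order = {"CSI": 0, "USB": 1}
--     parts = []
--     for iface in sorted(grouped.keys(), key=lambda x: type_order.get(x, 2)):
--         names = grouped[iface]
--         n = len(names)
--         if n == 1:
--             desc = names[0]
--         else:
--             unique_names = set(names)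
--             if len(unique_names) == 1:
--                 desc = f"{names[0]} (x{n})"
--             else:
--                 desc = ", ".join(names)
--         label = f"{iface} camera" + ("" if n == 1 else "s")
--         parts.append(f"{n} {label} ({desc})")
--     summary = " and ".join(parts)
--     return f"Detected {count} camera{'s' if count != 1 else ''}: {summary}."
-- ===== SOURCE B (Python) =====
-- def summarize_cameras(cameras):
--     count = len(cameras)
--     if count == 0:
--         return "Detected 0 cameras."
--     # first-appearance list of interface types, then bucket-concatenate: CSI, USB, everything else
--     seen = []
--     for iface, _ in cameras:
--         if iface not in seen:
--             seen.append(iface)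
--     order = ([i for i in seen if i == "CSI"]
--              + [i for i in seen if i == "USB"]
--              + [i for i in seen if i != "CSI" and i != "USB"])
--     parts = []
--     for iface in order:
--         names = [name for i, name in cameras if i == iface]
--         n = len(names)
--         if n == 1:
--             desc = names[0]
--         elif all(x == names[0] for x in names):
--             desc = f"{names[0]} (x{n})"
--         else:
--             desc = ", ".join(names)
--         parts.append(f"{n} {iface} camera{'' if n == 1 else 's'} ({desc})")
--     return f"Detected {count} camera{'' if count == 1 else 's'}: {' and '.join(parts)}."
-- ===== Notes on version B (the rewrite author's own statement) =====
-- stated objective: alternative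
-- what changed: Replaces A's dict-of-lists grouping plus a key-sort of the dict keys by a single first-appearance scan of the interface types followed by three stable buckets (CSI, USB, other) concatenated in order, with per-group names gathered by a filter and the all-equal test replacing len(set(...))==1.
import Mathlib
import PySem

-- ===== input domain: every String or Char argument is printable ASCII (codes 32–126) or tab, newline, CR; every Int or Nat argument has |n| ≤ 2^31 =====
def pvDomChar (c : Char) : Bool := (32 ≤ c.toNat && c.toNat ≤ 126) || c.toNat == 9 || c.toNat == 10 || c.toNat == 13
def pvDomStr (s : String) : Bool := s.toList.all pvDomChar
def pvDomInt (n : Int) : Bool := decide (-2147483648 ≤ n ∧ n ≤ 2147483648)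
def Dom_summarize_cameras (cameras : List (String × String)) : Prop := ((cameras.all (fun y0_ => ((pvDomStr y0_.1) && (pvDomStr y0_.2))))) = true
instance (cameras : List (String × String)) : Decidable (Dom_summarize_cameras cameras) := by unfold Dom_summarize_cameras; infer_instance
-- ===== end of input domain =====

-- B replaces A's dict-grouping plus key-sort of the keys by a first-appearance scan and three
-- stable buckets (CSI, USB, other) concatenated in order; objective: alternative decomposition.

-- ===== PORT A =====
def summarize_cameras (cameras : List (String × String)) : String :=
  let count := cameras.length
  if count == 0 then "Detected 0 cameras."
  else
    -- grouped.setdefault(iface, []).append(name)  ==  d.modify iface [] (· ++ [name])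
    let grouped := cameras.foldl (fun d p => d.modify p.1 [] (fun l => l ++ [p.2])) PySem.Dict.empty
    let typeOrder : PySem.Dict String Int := PySem.Dict.ofList [("CSI", 0), ("USB", 1)]
    let parts := (PySem.List.sorted grouped.keys (fun x => typeOrder.getD x 2)).foldl
      (fun acc iface =>
        let names := grouped.getD iface []     -- grouped[iface]; iface ∈ grouped.keys, so no KeyError
        let n := names.length
        let desc := if n == 1 then names.headD ""   -- names[0]; names is nonempty here
          else if (PySem.Set.ofList names).length == 1 then
            names.headD "" ++ " (x" ++ PySem.Int.toStr (n : Int) ++ ")"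
          else PySem.Str.join ", " names
        let label := iface ++ " camera" ++ (if !(n == 1) then "s" else "")
        acc ++ [PySem.Int.toStr (n : Int) ++ " " ++ label ++ " (" ++ desc ++ ")"]) []
    "Detected " ++ PySem.Int.toStr (count : Int) ++ " camera" ++
      (if !(count == 1) then "s" else "") ++ ": " ++ PySem.Str.join " and " parts ++ "."

-- ===== PORT B =====
def summarize_cameras_alt (cameras : List (String × String)) : String :=
  let count := cameras.length
  if count == 0 then "Detected 0 cameras."
  else
    let seen := cameras.foldl (fun s p => PySem.Set.add s p.1) PySem.Set.empty
    let order := seen.filter (· == "CSI") ++ seen.filter (· == "USB")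
      ++ seen.filter (fun i => !(i == "CSI") && !(i == "USB"))
    let parts := order.map (fun iface =>
      let names := (cameras.filter (fun p => p.1 == iface)).map (·.2)
      let n := names.length
      let desc := if n == 1 then names.headD ""   -- names[0]; names is nonempty here
        else if names.all (fun x => x == names.headD "") then
          names.headD "" ++ " (x" ++ PySem.Int.toStr (n : Int) ++ ")"
        else PySem.Str.join ", " names
      PySem.Int.toStr (n : Int) ++ " " ++ iface ++ " camera" ++ (if n == 1 then "" else "s")
        ++ " (" ++ desc ++ ")")
    "Detected " ++ PySem.Int.toStr (count : Int) ++ " camera" ++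
      (if count == 1 then "" else "s") ++ ": " ++ PySem.Str.join " and " parts ++ "."

-- ===== PRECONDITION & SPEC =====
def Spec_summarize_cameras (cameras : List (String × String)) (out : String) : Prop := out = summarize_cameras_alt cameras
instance (cameras : List (String × String)) (out : String) : Decidable (Spec_summarize_cameras cameras out) := by unfold Spec_summarize_cameras; infer_instance

-- ===== CLAIM (what is proved, stated in full; the proofs are below) =====
def Claim_equal_summarize_cameras : Prop := ∀ (cameras : List (String × String)), Dom_summarize_cameras cameras → Spec_summarize_cameras cameras (summarize_cameras cameras)

-- ===== LEMMAS AND PROOFS =====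

-- the sort key A uses: type_order.get(x, 2)
def pvKeyF (x : String) : Int := if x == "CSI" then 0 else if x == "USB" then 1 else 2

lemma pv_typeOrder_getD (x : String) :
    (PySem.Dict.ofList [("CSI", (0:Int)), ("USB", 1)]).getD x 2 = pvKeyF x := by
  have h : PySem.Dict.ofList [("CSI", (0:Int)), ("USB", 1)] = PySem.Dict.mk [("CSI", 0), ("USB", 1)] := by decide
  rw [h, PySem.Dict.getD_eq_get?_getD]
  rw [PySem.Dict.get?_mk_cons, PySem.Dict.get?_mk_cons]
  unfold pvKeyF
  have hnil : (PySem.Dict.mk ([] : List (String × Int))).get? x = none := rfl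
  by_cases h1 : x = "CSI"
  · subst h1; decide
  · by_cases h2 : x = "USB"
    · subst h2; decide
    · simp [hnil, beq_iff_eq, h1, h2, Ne.symm h1, Ne.symm h2]

lemma pv_insertBy_skip {α : Type} (bf : α → α → Bool) (x : α) (l r : List α)
    (h : ∀ y ∈ l, bf x y = false) :
    PySem.List.insertBy bf x (l ++ r) = l ++ PySem.List.insertBy bf x r := by
  induction l with
  | nil => rfl
  | cons y t ih =>
    have hy := h y (by simp)
    simp only [List.cons_append, PySem.List.insertBy, hy]
    simp only [Bool.false_eq_true, if_false]
    rw [ih (fun z hz => h z (by simp [hz]))]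

lemma pv_insertBy_front {α : Type} (bf : α → α → Bool) (x : α) (r : List α)
    (h : ∀ y ∈ r, bf x y = true) :
    PySem.List.insertBy bf x r = x :: r := by
  cases r with
  | nil => rfl
  | cons y t => simp [PySem.List.insertBy, h y (by simp)]

-- A's stable sort by the 3-valued key is exactly B's bucket concatenation
lemma pv_sorted_buckets (xs : List String) :
    PySem.List.sorted xs pvKeyF false =
      xs.filter (· == "CSI") ++ xs.filter (· == "USB")
        ++ xs.filter (fun i => !(i == "CSI") && !(i == "USB")) := by
  induction xs using List.reverseRecOn with
  | nil => rfl
  | append_singleton xs x ih =>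
    rw [PySem.List.sorted_eq_foldl_insertBy, List.foldl_append, List.foldl_cons, List.foldl_nil,
        ← PySem.List.sorted_eq_foldl_insertBy, ih]
    have hf0 : ∀ y ∈ xs.filter (· == "CSI"), pvKeyF y = 0 := by
      intro y hy; have h := (List.mem_filter.mp hy).2
      rw [show y = "CSI" by simpa using h]; decide
    have hf1 : ∀ y ∈ xs.filter (· == "USB"), pvKeyF y = 1 := by
      intro y hy; have h := (List.mem_filter.mp hy).2
      rw [show y = "USB" by simpa using h]; decide
    have hf2 : ∀ y ∈ xs.filter (fun i => !(i == "CSI") && !(i == "USB")), pvKeyF y = 2 := by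
      intro y hy; have h := (List.mem_filter.mp hy).2
      simp only [Bool.and_eq_true, Bool.not_eq_true', beq_eq_false_iff_ne, ne_eq] at h
      simp [pvKeyF, h.1, h.2]
    by_cases h1 : x = "CSI"
    · subst h1
      rw [List.append_assoc,
          pv_insertBy_skip _ _ _ _ (by intro y hy; rw [hf0 y hy]; decide),
          pv_insertBy_front _ _ _ (by
            intro y hy
            rcases List.mem_append.mp hy with h | h
            · rw [hf1 y h]; decide
            · rw [hf2 y h]; decide)]
      simp [List.filter_append]
    · by_cases h2 : x = "USB"
      · subst h2
        rw [pv_insertBy_skip _ _ _ _ (by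
              intro y hy
              rcases List.mem_append.mp hy with h | h
              · rw [hf0 y h]; decide
              · rw [hf1 y h]; decide),
            pv_insertBy_front _ _ _ (by
              intro y hy
              rw [hf2 y hy]; decide)]
        simp [List.filter_append]
      · have hx2 : pvKeyF x = 2 := by simp [pvKeyF, h1, h2]
        rw [show (xs.filter (· == "CSI") ++ xs.filter (· == "USB")
              ++ xs.filter (fun i => !(i == "CSI") && !(i == "USB"))) =
            (xs.filter (· == "CSI") ++ xs.filter (· == "USB")
              ++ xs.filter (fun i => !(i == "CSI") && !(i == "USB"))) ++ [] by simp,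
            pv_insertBy_skip _ _ _ _ (by
              intro y hy
              have hk : pvKeyF y ≤ 2 := by
                rcases List.mem_append.mp hy with h | h
                · rcases List.mem_append.mp h with h | h
                  · rw [hf0 y h]; decide
                  · rw [hf1 y h]; decide
                · rw [hf2 y h]
              show decide (pvKeyF x < pvKeyF y) = false
              rw [hx2]; simp; omega),
            show PySem.List.insertBy (fun a b => decide (pvKeyF a < pvKeyF b)) x [] = [x] from rfl]
        simp [List.filter_append, h1, h2]

lemma pv_foldl_add_len (t : List String) (s : List String) :
    s.length ≤ (t.foldl PySem.Set.add s).length := by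
  induction t generalizing s with
  | nil => simp
  | cons c t ih2 =>
    refine le_trans ?_ (ih2 (PySem.Set.add s c))
    simp [PySem.Set.add]; split <;> simp

-- A's len(set(names)) == 1 is B's all-equal-to-first test
lemma pv_setlen (a : String) (t : List String) :
    ((t.foldl PySem.Set.add [a]).length == 1) = t.all (fun x => x == a) := by
  induction t with
  | nil => rfl
  | cons b t ih =>
    by_cases hb : b = a
    · subst hb; simpa [PySem.Set.add, PySem.Set.contains] using ih
    · have : PySem.Set.add [a] b = [a, b] := by
        simp [PySem.Set.add, PySem.Set.contains, hb]
      simp only [List.foldl_cons, this, List.all_cons]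
      rw [Bool.eq_iff_iff]
      constructor
      · intro h
        have := pv_foldl_add_len t [a, b]
        simp at h this; omega
      · intro h; simp [hb] at h

set_option maxHeartbeats 1000000 in
lemma pv_main (cameras : List (String × String)) :
    summarize_cameras cameras = summarize_cameras_alt cameras := by
  unfold summarize_cameras summarize_cameras_alt
  by_cases h0 : (cameras.length == 0) = true
  · simp only [h0, if_true]
  · simp only [h0, Bool.false_eq_true, if_false]
    have hkeys : (cameras.foldl (fun d p => d.modify p.1 [] (fun l => l ++ [p.2])) PySem.Dict.empty).keys
        = PySem.Set.ofList (cameras.map (·.1)) := by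
      rw [PySem.Dict.keys_foldl_modify_key cameras (fun p => p.1) [] (fun d p => fun l => l ++ [p.2]) PySem.Dict.empty]
      rfl
    have hseen : cameras.foldl (fun s p => PySem.Set.add s p.1) PySem.Set.empty
        = PySem.Set.ofList (cameras.map (·.1)) := by
      rw [PySem.Set.ofList_eq_foldl, List.foldl_map]
      rfl
    rw [hkeys, hseen]
    rw [show (fun x => (PySem.Dict.ofList [("CSI", (0:Int)), ("USB", 1)]).getD x 2) = pvKeyF from funext pv_typeOrder_getD]
    rw [pv_sorted_buckets]
    rw [PySem.List.foldl_append_singleton_eq_map]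
    simp only [List.nil_append]
    congr 2
    case _ => cases hc : (cameras.length == 1) <;> simp
    congr 1
    apply List.map_congr_left
    intro iface hif
    have hmem : iface ∈ cameras.map (·.1) := by
      rcases List.mem_append.mp hif with h | h
      · rcases List.mem_append.mp h with h | h <;>
          exact (PySem.Set.mem_ofList _ _).mp (List.mem_filter.mp h).1
      · exact (PySem.Set.mem_ofList _ _).mp (List.mem_filter.mp h).1
    have hnames : (cameras.foldl (fun d p => d.modify p.1 [] (fun l => l ++ [p.2])) PySem.Dict.empty).getD iface []
        = (cameras.filter (fun p => p.1 == iface)).map (·.2) := by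
      rw [PySem.Dict.getD_foldl_modify_append]
      rfl
    rw [hnames]
    obtain ⟨p, hp, hfst⟩ := List.mem_map.mp hmem
    have hpf : p ∈ cameras.filter (fun p => p.1 == iface) :=
      List.mem_filter.mpr ⟨hp, by simp [hfst]⟩
    cases hnm : (cameras.filter (fun p => p.1 == iface)).map (·.2) with
    | nil => exact absurd (List.mem_map_of_mem hpf (f := (·.2))) (by simp [hnm])
    | cons a t =>
      have hcond : ((PySem.Set.ofList (a :: t)).length == 1) = (a :: t).all (fun x => x == (a :: t).headD "") := by
        have h1 : PySem.Set.ofList (a :: t) = t.foldl PySem.Set.add [a] := rfl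
        rw [h1, pv_setlen]
        simp
      simp only [hcond]
      by_cases hn1 : ((a :: t).length == 1) = true <;>
        by_cases hall : ((a :: t).all (fun x => x == (a :: t).headD "")) = true <;>
          simp only [hn1, hall, Bool.false_eq_true, if_true, if_false, Bool.not_true, Bool.not_false] <;>
            simp [String.append_assoc]

-- ===== VERDICT (by name: the statement is the Claim_ definition above) =====
theorem summarize_cameras_spec : Claim_equal_summarize_cameras := by
  intro cameras _
  unfold Spec_summarize_cameras
  exact pv_main cameras
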